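-- pv_equiv track=rewrite | github.com/KL3YT0/python-lab | lab6/lab5.py | row_num
-- ===== SOURCE A (Python) =====
-- def max_row_series(row):
--     curr_item = row[0]
--     max_series = 0
--     curr_series = 1
--
--     for item in row[1:]:
--         if item == curr_item:
--             curr_series += 1
--             continue
--
--         curr_item = item
--         max_series = max([max_series, curr_series])
--         curr_series = 1
--
--     return max([max_series, curr_series])
--
-- def row_num(matrix):
--     row = 0
--     max_series = 0
--     curr_series = 0
--
--     for i, item in enumerate(matrix):
--         curr_series = max_row_series(item)
--
--         if (curr_series > max_series):
--             max_series = curr_series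
--             row = i
--
--     return [row, max_series]
-- ===== SOURCE B (Python) =====
-- def longest_run(row):
--     # boundary positions: i where a new run starts (row[i] != row[i-1]),
--     # plus sentinels 0 and len(row); the longest run is the largest gap
--     n = len(row)
--     cuts = [0] + [i for i, (a, b) in enumerate(zip(row, row[1:]), 1) if a != b] + [n]
--     return max(b - a for a, b in zip(cuts, cuts[1:]))
--
-- def row_num(matrix):
--     runs = [longest_run(row) for row in matrix]
--     if not runs:
--         return [0, 0]
--     best_i, best = max(enumerate(runs), key=lambda p: p[1])
--     return [best_i, best]
-- ===== Notes on version B (the rewrite author's own statement) =====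
-- stated objective: alternative
-- what changed: Per-row longest run is computed from the explicit list of run-boundary positions (indices where the value changes, plus sentinels 0 and len) as the largest gap between consecutive boundaries, instead of A's per-element curr_item/max_series/curr_series counter state machine; the best row is picked with max(enumerate(runs), key=...) instead of A's online strictly-greater update loop.
import Mathlib
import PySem

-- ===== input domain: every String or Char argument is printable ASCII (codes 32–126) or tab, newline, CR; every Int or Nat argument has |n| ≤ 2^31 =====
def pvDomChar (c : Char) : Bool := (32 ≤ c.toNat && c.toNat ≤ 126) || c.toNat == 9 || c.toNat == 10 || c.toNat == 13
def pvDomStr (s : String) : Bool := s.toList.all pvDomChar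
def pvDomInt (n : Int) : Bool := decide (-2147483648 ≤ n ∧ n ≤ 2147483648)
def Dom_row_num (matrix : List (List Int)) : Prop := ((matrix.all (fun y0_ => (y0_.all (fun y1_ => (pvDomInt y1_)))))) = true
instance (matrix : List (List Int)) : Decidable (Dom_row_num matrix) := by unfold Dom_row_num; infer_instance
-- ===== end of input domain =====

-- B computes each row's longest run from the list of run-boundary positions (indices where the
-- value changes, plus sentinels 0 and len) as the largest gap between consecutive boundaries, and
-- picks the best row with max over enumerate(runs) — no per-element run counter at all (objective:
-- alternative). Return-value equivalence on matrices with no empty row (A raises IndexError there).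

-- ===== PORT A =====
def maxRowSeries (row : List Int) : Int :=
  match row with
  | [] => 0   -- Python raises IndexError at row[0]; such rows are excluded by Pre_row_num
  | h :: t =>
    let st := t.foldl (fun (s : Int × Int × Int) item =>
      if item = s.1 then (s.1, s.2.1, s.2.2 + 1)
      else (item, max s.2.1 s.2.2, 1)) (h, 0, 1)
    max st.2.1 st.2.2

def row_num (matrix : List (List Int)) : List Int :=
  let st := (PySem.List.enumerate matrix 0).foldl (fun (s : Int × Int) p =>
    let cs := maxRowSeries p.2
    if cs > s.2 then (p.1, cs) else s) (0, 0)
  [st.1, st.2]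

-- ===== PORT B =====
-- cuts = [0] + [i for i,(a,b) in enumerate(zip(row,row[1:]),1) if a != b] + [n];
-- longest run = max(b - a for a,b in zip(cuts, cuts[1:]))
def longestRun (row : List Int) : Int :=
  let n : Int := (row.length : Int)
  let cuts : List Int :=
    0 :: ((PySem.List.enumerate (row.zip (PySem.List.slice row (some 1) none)) 1).filter
          (fun p => p.2.1 != p.2.2)).map (·.1) ++ [n]
  match (cuts.zip (PySem.List.slice cuts (some 1) none)).map (fun p => p.2 - p.1) with
  | [] => 0        -- unreachable: cuts always has at least two elements
  | v :: t => t.foldl max v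

def row_num_alt (matrix : List (List Int)) : List Int :=
  let runs := matrix.map longestRun
  match PySem.List.max? (PySem.List.enumerate runs 0) (fun p => p.2) with
  | none => [0, 0]             -- 'if not runs: return [0, 0]'
  | some p => [p.1, p.2]

-- ===== PRECONDITION & SPEC =====
-- Pre_ excludes exactly the matrices containing an empty row: there A raises IndexError (row[0]).
def Pre_row_num (matrix : List (List Int)) : Prop := ∀ row ∈ matrix, row ≠ []
instance (matrix : List (List Int)) : Decidable (Pre_row_num matrix) := by unfold Pre_row_num; infer_instance

def pvWitness_row_num : List (List Int) := [[1, 1, 2], [3]]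

def Spec_row_num (matrix : List (List Int)) (out : List Int) : Prop := out = row_num_alt matrix
instance (matrix : List (List Int)) (out : List Int) : Decidable (Spec_row_num matrix out) := by unfold Spec_row_num; infer_instance

-- ===== CLAIM (what is proved, stated in full; the proofs are below) =====
def Claim_equal_row_num : Prop := ∀ (matrix : List (List Int)), Dom_row_num matrix → Pre_row_num matrix → Spec_row_num matrix (row_num matrix)

-- ===== LEMMAS AND PROOFS =====

-- length of the leading run of value c in t, and the remainder after it
def countRun (c : Int) : List Int → Nat
  | [] => 0
  | x :: t => if x = c then countRun c t + 1 else 0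

def dropRun (c : Int) : List Int → List Int
  | [] => []
  | x :: t => if x = c then dropRun c t else x :: t

theorem length_run_decomp (c : Int) (t : List Int) :
    t.length = countRun c t + (dropRun c t).length := by
  induction t with
  | nil => simp [countRun, dropRun]
  | cons x t ih =>
    simp only [countRun, dropRun]
    split <;> simp
    omega

-- reference value: longest run given a current run of value c, length s, followed by t
def scanFrom (c s : Int) : List Int → Int
  | [] => s
  | x :: t => if x = c then scanFrom c (s + 1) t else max s (scanFrom x 1 t)

theorem scanFrom_ge (t : List Int) : ∀ c s, s ≤ scanFrom c s t := by
  induction t with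
  | nil => intro c s; simp [scanFrom]
  | cons x t ih =>
    intro c s
    simp only [scanFrom]
    split
    · exact le_trans (by omega) (ih c (s + 1))
    · exact le_max_left _ _

theorem scanFrom_eq (t : List Int) : ∀ c s,
    scanFrom c s t = (match dropRun c t with
      | [] => s + countRun c t
      | x :: r => max (s + countRun c t) (scanFrom x 1 r)) := by
  induction t with
  | nil => intro c s; simp [scanFrom, dropRun, countRun]
  | cons x t ih =>
    intro c s
    simp only [scanFrom, dropRun, countRun]
    split
    · rw [ih c (s + 1)]
      cases hd : dropRun c t <;> simp <;> ring_nf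
    · simp

-- A's inner fold computes scanFrom
theorem foldlA_eq (t : List Int) : ∀ c m s,
    (let st := t.foldl (fun (s : Int × Int × Int) item =>
      if item = s.1 then (s.1, s.2.1, s.2.2 + 1)
      else (item, max s.2.1 s.2.2, 1)) (c, m, s)
     max st.2.1 st.2.2) = max m (scanFrom c s t) := by
  induction t with
  | nil => intro c m s; simp [scanFrom]
  | cons x t ih =>
    intro c m s
    simp only [List.foldl_cons, scanFrom]
    by_cases hx : x = c
    · rw [if_pos hx, if_pos hx]
      exact ih c m (s + 1)
    · rw [if_neg hx, if_neg hx]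
      rw [ih x (max m s) 1, max_assoc]

theorem maxRowSeries_eq_scan (h : Int) (t : List Int) :
    maxRowSeries (h :: t) = scanFrom h 1 t := by
  show (let st := t.foldl _ (h, 0, 1); max st.2.1 st.2.2) = _
  rw [foldlA_eq t h 0 1]
  exact max_eq_right (le_trans (by omega) (scanFrom_ge t h 1))

-- B side: the break-position list of row (h :: t), with starting index k
def mask (row : List Int) (k : Int) : List Int :=
  ((PySem.List.enumerate (row.zip (PySem.List.slice row (some 1) none)) k).filter
    (fun p => p.2.1 != p.2.2)).map (·.1)

theorem mask_eq (t : List Int) : ∀ (h : Int) (k : Int),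
    mask (h :: t) k = (match dropRun h t with
      | [] => []
      | x :: r => (k + (countRun h t : Int)) :: mask (x :: r) (k + (countRun h t : Int) + 1)) := by
  induction t with
  | nil => intro h k; simp [mask, dropRun, PySem.List.slice_from_one, PySem.List.enumerate_nil]
  | cons x t ih =>
    intro h k
    by_cases hx : x = h
    · subst hx
      have e1 : dropRun x (x :: t) = dropRun x t := by simp [dropRun]
      have e2 : countRun x (x :: t) = countRun x t + 1 := by simp [countRun]
      have lhs : mask (x :: x :: t) k = mask (x :: t) (k + 1) := by
        simp [mask, PySem.List.slice_from_one, PySem.List.enumerate_cons]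
      rw [lhs, e1, e2, ih x (k + 1)]
      cases hd : dropRun x t with
      | nil => rfl
      | cons y r =>
        simp only []
        have e3 : k + 1 + (countRun x t : Int) = k + ((countRun x t + 1 : Nat) : Int) := by
          push_cast; ring
        rw [e3]
    · have e1 : dropRun h (x :: t) = x :: t := by simp [dropRun, hx]
      have e2 : countRun h (x :: t) = 0 := by simp [countRun, hx]
      have hb : (h != x) = true := by simp [bne]; exact fun he => hx he.symm
      have lhs : mask (h :: x :: t) k = k :: mask (x :: t) (k + 1) := by
        simp [mask, PySem.List.slice_from_one, PySem.List.enumerate_cons, hb]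
      rw [lhs, e1, e2]
      simp

-- gaps of the cut list a :: l ++ [n]
def gapsOf (a : Int) (l : List Int) (n : Int) : List Int :=
  match l with
  | [] => [n - a]
  | b :: l' => (b - a) :: gapsOf b l' n

theorem gaps_zip (l : List Int) : ∀ (a n : Int),
    (((a :: l ++ [n]).zip (PySem.List.slice (a :: l ++ [n]) (some 1) none)).map
      (fun p => p.2 - p.1)) = gapsOf a l n := by
  induction l with
  | nil => intro a n; simp [PySem.List.slice_from_one, gapsOf]
  | cons b l ih =>
    intro a n
    simp only [PySem.List.slice_from_one, List.cons_append, List.tail_cons, List.zip_cons_cons,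
      List.map_cons, gapsOf]
    congr 1
    have := ih b n
    simpa [PySem.List.slice_from_one] using this

-- nonempty fold-max with seed, as Python's max over a nonempty list
def listMaxFold : List Int → Int
  | [] => 0
  | v :: t => t.foldl max v

theorem foldl_max_init (l : List Int) : ∀ u w, l.foldl max (max u w) = max u (l.foldl max w) := by
  induction l with
  | nil => intro u w; rfl
  | cons x l ih =>
    intro u w
    simp only [List.foldl_cons]
    rw [max_assoc]
    exact ih u (max w x)

theorem gapsOf_ne_nil (a : Int) (l : List Int) (n : Int) : gapsOf a l n ≠ [] := by
  cases l <;> simp [gapsOf]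

-- the gap list of the cuts IS the run-length list; its max is scanFrom
theorem gaps_scan (N : Nat) : ∀ (t : List Int), t.length ≤ N → ∀ (h a : Int),
    listMaxFold (gapsOf a (mask (h :: t) (a + 1)) (a + 1 + (t.length : Int))) = scanFrom h 1 t := by
  induction N with
  | zero =>
    intro t ht h a
    have : t = [] := by cases t <;> simp_all
    subst this
    rw [mask_eq]
    simp [dropRun, gapsOf, listMaxFold, scanFrom]
  | succ N ih =>
    intro t ht h a
    rw [mask_eq, scanFrom_eq]
    cases hd : dropRun h t with
    | nil =>
      have hc : countRun h t = t.length := by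
        have := length_run_decomp h t; rw [hd] at this; simp at this; omega
      simp [gapsOf, listMaxFold, hc]
      ring
    | cons x r =>
      have hlen : t.length = countRun h t + 1 + r.length := by
        have := length_run_decomp h t; rw [hd] at this; simp at this; omega
      have hr : r.length ≤ N := by omega
      set a' : Int := a + 1 + (countRun h t : Int) with ha'
      have h2 : a + 1 + (t.length : Int) = a' + 1 + (r.length : Int) := by
        rw [ha']; push_cast [hlen]; ring
      rw [h2]
      simp only []
      simp only [gapsOf]
      have hda : a' - a = 1 + (countRun h t : Int) := by rw [ha']; ring
      rw [hda]
      have hIH := ih r hr x a'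
      cases hg : gapsOf a' (mask (x :: r) (a' + 1)) (a' + 1 + (r.length : Int)) with
      | nil => exact absurd hg (gapsOf_ne_nil _ _ _)
      | cons w ws =>
        rw [hg] at hIH
        show (w :: ws).foldl max (1 + (countRun h t : Int)) = _
        simp only [List.foldl_cons]
        rw [foldl_max_init, ← hIH]
        rfl

-- B's longestRun is scanFrom on nonempty rows
theorem longestRun_eq_scan (h : Int) (t : List Int) : longestRun (h :: t) = scanFrom h 1 t := by
  have key := gaps_scan t.length t le_rfl h 0
  simp only [zero_add] at key
  unfold mask at key
  have hn : (((h :: t).length : Nat) : Int) = 1 + (t.length : Int) := by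
    push_cast [List.length_cons]; ring
  simp only [longestRun]
  rw [gaps_zip, hn]
  cases hg : gapsOf 0 (((PySem.List.enumerate ((h :: t).zip (PySem.List.slice (h :: t) (some 1) none)) 1).filter
      (fun p => p.2.1 != p.2.2)).map (·.1)) (1 + (t.length : Int)) with
  | nil => exact absurd hg (gapsOf_ne_nil _ _ _)
  | cons v vs =>
    rw [hg] at key
    exact key

theorem longestRun_pos (h : Int) (t : List Int) : 1 ≤ longestRun (h :: t) := by
  rw [longestRun_eq_scan]; exact scanFrom_ge t h 1

theorem maxRowSeries_eq_longestRun (r : List Int) (hr : r ≠ []) :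
    maxRowSeries r = longestRun r := by
  cases r with
  | nil => exact absurd rfl hr
  | cons h t => rw [maxRowSeries_eq_scan, longestRun_eq_scan]

-- Python's max over a nonempty list, through PySem.List.max?, is the running strict-max fold
theorem max?_fold_some (t : List (Int × Int)) : ∀ m : Int × Int,
    PySem.List.max? (m :: t) (fun p => p.2)
    = some (t.foldl (fun c x => if c.2 < x.2 then x else c) m) := by
  induction t with
  | nil => intro m; rfl
  | cons x t ih =>
    intro m
    have h1 : PySem.List.max? (m :: x :: t) (fun p => p.2)
        = PySem.List.max? ((if m.2 < x.2 then x else m) :: t) (fun p => p.2) := by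
      by_cases hc : m.2 < x.2 <;> simp [PySem.List.max?, hc]
    rw [h1, ih, List.foldl_cons]

-- A's outer fold equals B's first-max fold over the run list
theorem foldA_eq_foldB (mat : List (List Int)) : ∀ (k : Int) (s : Int × Int), (∀ r ∈ mat, r ≠ []) →
    (PySem.List.enumerate mat k).foldl (fun (s : Int × Int) p =>
      if maxRowSeries p.2 > s.2 then (p.1, maxRowSeries p.2) else s) s
    = (PySem.List.enumerate (mat.map longestRun) k).foldl
        (fun (c : Int × Int) x => if c.2 < x.2 then x else c) s := by
  induction mat with
  | nil => intro k s _; simp [PySem.List.enumerate_nil]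
  | cons r mat ih =>
    intro k s hpre
    rw [List.map_cons, PySem.List.enumerate_cons, PySem.List.enumerate_cons]
    simp only [List.foldl_cons]
    rw [maxRowSeries_eq_longestRun r (hpre r List.mem_cons_self)]
    exact ih (k + 1) _ (fun r' h' => hpre r' (List.mem_cons_of_mem _ h'))

-- ===== VERDICT (by name: the statement is the Claim_ definition above) =====
theorem row_num_spec : Claim_equal_row_num := by
  intro matrix _ hpre
  unfold Spec_row_num row_num row_num_alt
  cases matrix with
  | nil => rfl
  | cons r mat =>
    have hr : r ≠ [] := hpre r List.mem_cons_self
    obtain ⟨h, t, rfl⟩ : ∃ h t, r = h :: t := by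
      cases r with
      | nil => exact absurd rfl hr
      | cons h t => exact ⟨h, t, rfl⟩
    simp only [List.map_cons, PySem.List.enumerate_cons, List.foldl_cons, zero_add]
    rw [maxRowSeries_eq_longestRun _ hr]
    have h1 : longestRun (h :: t) > (0 : Int) := longestRun_pos h t
    rw [if_pos h1]
    rw [foldA_eq_foldB mat 1 (0, longestRun (h :: t))
      (fun r' h' => hpre r' (List.mem_cons_of_mem _ h'))]
    rw [max?_fold_some]
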